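-- pv_equiv track=rewrite | github.com/GusVonDegurechaff/24.11 | 27.5.py | check_film_rule
-- ===== SOURCE A (Python) =====
-- def check_film_rule(z, sequence):
--     frame_count = 0
--
--     for element in sequence:
--         if element == -1:
--             # Проверяем условие для текущей сцены
--             if frame_count % z != 0:
--                 return "NO"
--             frame_count = 0
--         else:
--             frame_count += element
--
--     return "YES"
-- ===== SOURCE B (Python) =====
-- def check_film_rule(z, sequence):
--     # Parse: split the sequence into complete scenes at each -1 sentinel,
--     # discarding the unterminated trailing fragment.
--     scenes = []
--     current = []
--     for element in sequence:
--         if element == -1: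
--             scenes.append(current)
--             current = []
--         else:
--             current.append(element)
--     # Validate: every complete scene's frame total must be divisible by z.
--     return "NO" if any(sum(scene) % z != 0 for scene in scenes) else "YES"
-- ===== Notes on version B (the rewrite author's own statement) =====
-- stated objective: alternative
-- what changed: B first parses the sequence into a list of complete scenes split at each -1 sentinel, then validates divisibility of each scene's sum in a separate pass, instead of A's inline running accumulator with early return.
import Mathlib
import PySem

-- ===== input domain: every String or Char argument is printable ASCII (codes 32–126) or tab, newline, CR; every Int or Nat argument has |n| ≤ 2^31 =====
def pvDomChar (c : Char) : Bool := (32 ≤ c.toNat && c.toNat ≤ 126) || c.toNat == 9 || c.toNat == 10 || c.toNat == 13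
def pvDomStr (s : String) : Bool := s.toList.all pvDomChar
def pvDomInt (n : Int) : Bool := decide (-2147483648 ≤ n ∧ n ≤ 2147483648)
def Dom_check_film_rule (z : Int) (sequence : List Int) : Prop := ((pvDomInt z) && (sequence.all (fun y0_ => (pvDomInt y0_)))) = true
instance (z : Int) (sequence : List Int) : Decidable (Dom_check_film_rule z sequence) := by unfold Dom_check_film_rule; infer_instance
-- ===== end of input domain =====

-- B parses the sequence into complete scenes split at each -1 sentinel, then validates each
-- scene sum's divisibility in a separate pass (alternative decomposition, same O(n) cost).


-- ===== PORT A =====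
-- loop over sequence with running frame_count, early "NO" return at a failing -1 check
def checkLoopA (z : Int) : List Int → Int → String
  | [], _ => "YES"
  | e :: rest, fc =>
    if e = -1 then
      if PySem.Int.mod fc z ≠ 0 then "NO" else checkLoopA z rest 0
    else
      checkLoopA z rest (fc + e)

def check_film_rule (z : Int) (sequence : List Int) : String :=
  checkLoopA z sequence 0

-- ===== PORT B =====
-- pass 1: split into complete scenes at each -1 (trailing fragment `cur` discarded)
def sceneSplit : List Int → List Int → List (List Int)
  | [], _ => []
  | e :: rest, cur =>
    if e = -1 then cur :: sceneSplit rest [] else sceneSplit rest (cur ++ [e])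

-- pass 2: any scene sum not divisible by z ⇒ "NO"
def check_film_rule_alt (z : Int) (sequence : List Int) : String :=
  if (sceneSplit sequence []).any (fun s => PySem.Int.mod s.sum z ≠ 0) then "NO" else "YES"

-- ===== PRECONDITION & SPEC =====
-- Pre_ excludes exactly the inputs where Python A raises ZeroDivisionError (z == 0 with a
-- -1 sentinel present); B raises the same exception there.
def Pre_check_film_rule (z : Int) (sequence : List Int) : Prop :=
  z ≠ 0 ∨ ¬ ((-1 : Int) ∈ sequence)
instance (z : Int) (sequence : List Int) : Decidable (Pre_check_film_rule z sequence) := by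
  unfold Pre_check_film_rule; infer_instance

def pvWitness_check_film_rule : Int × List Int := (3, [1, 2, -1, 6, -1, 4])

def Spec_check_film_rule (z : Int) (sequence : List Int) (out : String) : Prop := out = check_film_rule_alt z sequence
instance (z : Int) (sequence : List Int) (out : String) : Decidable (Spec_check_film_rule z sequence out) := by unfold Spec_check_film_rule; infer_instance

-- ===== CLAIM (what is proved, stated in full; the proofs are below) =====
def Claim_equal_check_film_rule : Prop := ∀ (z : Int) (sequence : List Int), Dom_check_film_rule z sequence → Pre_check_film_rule z sequence → Spec_check_film_rule z sequence (check_film_rule z sequence)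

-- ===== LEMMAS AND PROOFS =====

-- main invariant: A's running accumulator equals the current fragment's sum
theorem checkLoopA_eq (z : Int) (seq : List Int) :
    ∀ cur : List Int,
      checkLoopA z seq cur.sum =
        (if (sceneSplit seq cur).any (fun s => PySem.Int.mod s.sum z ≠ 0) then "NO" else "YES") := by
  induction seq with
  | nil => intro cur; simp [checkLoopA, sceneSplit]
  | cons e rest ih =>
    intro cur
    by_cases he : e = -1
    · simp only [checkLoopA, sceneSplit, he]
      by_cases hm : PySem.Int.mod cur.sum z ≠ 0
      · simp [hm]
      · have := ih ([] : List Int)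
        simp only [List.sum_nil] at this
        simp [hm, this]
    · have h1 : cur.sum + e = (cur ++ [e]).sum := by simp
      simp only [checkLoopA, sceneSplit, if_neg he, h1]
      exact ih (cur ++ [e])

-- ===== VERDICT (by name: the statement is the Claim_ definition above) =====
theorem check_film_rule_spec : Claim_equal_check_film_rule := by
  intro z seq _ _
  unfold Spec_check_film_rule check_film_rule check_film_rule_alt
  have := checkLoopA_eq z seq []
  simpa using this
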